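-- pv_equiv track=rewrite | github.com/RoronoaZoro321/ada | binary_serch.py | binarySearch_closest_with_duplicate
-- ===== SOURCE A (Python) =====
-- def binarySearch_closest_with_duplicate(array, x, low, high):
--     closest_below = None
--     closest_above = None
--     while low <= high:
--         mid = (high + low)//2
--         if array[mid] == x:
--             return (mid, mid)
--         elif array[mid] < x:
--             closest_below = mid
--             low = mid + 1
--         else:
--             closest_above = mid
--             high = mid - 1
--     return (closest_below, closest_above)
-- ===== SOURCE B (Python) =====
-- def _probe(array, x, low, high):
--     # stage 1: record the sequence of probed (index, value) pairs; stops at a hit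
--     if low > high:
--         return []
--     mid = (high + low) // 2
--     v = array[mid]
--     if v == x:
--         return [(mid, v)]
--     if v < x:
--         return [(mid, v)] + _probe(array, x, mid + 1, high)
--     return [(mid, v)] + _probe(array, x, low, mid - 1)
--
--
-- def binarySearch_closest_with_duplicate(array, x, low, high):
--     # stage 2: derive the answer from the probe path, scanned most-recent-first
--     rpath = list(reversed(_probe(array, x, low, high)))
--     if not rpath:
--         return (None, None)
--     m, v = rpath[0]
--     if v == x:
--         return (m, m)
--     below = next((i for i, w in rpath if w < x), None)
--     above = next((i for i, w in rpath if w > x), None)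
--     return (below, above)
-- ===== Notes on version B (the rewrite author's own statement) =====
-- stated objective: alternative
-- what changed: A's single loop threading closest_below/closest_above accumulators is replaced by two stages: a recursion that records the probe path as a list of (index,value) pairs, then a scan of the reversed path picking the most recent value below and above x.
-- outside the precondition, e.g. on binarySearch_closest_with_duplicate([1, 2, 3], 5, 0, 5): A raises IndexError, B raises IndexError; on binarySearch_closest_with_duplicate([1, 2], 1, -4, 1): A returns (-2, -2), B returns (-2, -2)
import Mathlib
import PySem

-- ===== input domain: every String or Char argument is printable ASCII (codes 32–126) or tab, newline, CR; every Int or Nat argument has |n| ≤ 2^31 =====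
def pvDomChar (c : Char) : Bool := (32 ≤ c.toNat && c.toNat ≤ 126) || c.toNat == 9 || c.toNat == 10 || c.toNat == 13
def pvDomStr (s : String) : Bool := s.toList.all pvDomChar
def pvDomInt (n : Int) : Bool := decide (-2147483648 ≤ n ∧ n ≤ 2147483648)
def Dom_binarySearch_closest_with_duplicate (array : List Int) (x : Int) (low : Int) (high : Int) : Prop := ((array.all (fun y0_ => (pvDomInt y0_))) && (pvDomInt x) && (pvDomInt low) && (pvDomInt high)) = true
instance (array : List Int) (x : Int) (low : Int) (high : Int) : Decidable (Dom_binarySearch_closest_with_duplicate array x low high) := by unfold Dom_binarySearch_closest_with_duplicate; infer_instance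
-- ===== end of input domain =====

-- B replaces A's accumulator-threading loop by two stages: a recursion that records the probe
-- path as a list of (index, value) pairs, then a scan of the reversed path (objective: alternative).

-- ===== PORT A =====
-- Python's 'mid = (high + low)//2', shared verbatim by both ports.
def pyMid (low : Int) (high : Int) : Int := PySem.Int.floordiv (high + low) 2

-- A's while-loop, transliterated as recursion over the loop state (low, high, closest_below, closest_above).
-- On an out-of-range index (Python IndexError, excluded by Pre_) it returns the current accumulators.
def bsA_loop (array : List Int) (x : Int) (low : Int) (high : Int)
    (cb : Option Int) (ca : Option Int) : Option Int × Option Int :=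
  if h : low ≤ high then
    match PySem.List.pyGet? array (pyMid low high) with
    | none => (cb, ca)  -- IndexError in Python; unreachable under Pre_
    | some v =>
      if v = x then (some (pyMid low high), some (pyMid low high))
      else if v < x then bsA_loop array x (pyMid low high + 1) high (some (pyMid low high)) ca
      else bsA_loop array x low (pyMid low high - 1) cb (some (pyMid low high))
  else (cb, ca)
termination_by (high - low + 1).toNat
decreasing_by
  all_goals
    have hb := PySem.Int.floordiv_two_mid_bounds (lo := low) (hi := high) h
    rw [Int.add_comm low high] at hb
    simp only [pyMid]
    omega

def binarySearch_closest_with_duplicate (array : List Int) (x : Int) (low : Int) (high : Int) : Option Int × Option Int :=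
  bsA_loop array x low high none none

-- ===== PORT B =====
-- Stage 1 of Source B: the probe path, a list of (index, value) pairs, stopping at a hit.
-- On an out-of-range index (Python IndexError, excluded by Pre_) it returns the empty path.
def bsB_probe (array : List Int) (x : Int) (low : Int) (high : Int) : List (Int × Int) :=
  if h : low ≤ high then
    match PySem.List.pyGet? array (pyMid low high) with
    | none => []  -- IndexError in Python; unreachable under Pre_
    | some v =>
      if v = x then [(pyMid low high, v)]
      else if v < x then (pyMid low high, v) :: bsB_probe array x (pyMid low high + 1) high
      else (pyMid low high, v) :: bsB_probe array x low (pyMid low high - 1)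
  else []
termination_by (high - low + 1).toNat
decreasing_by
  all_goals
    have hb := PySem.Int.floordiv_two_mid_bounds (lo := low) (hi := high) h
    rw [Int.add_comm low high] at hb
    simp only [pyMid]
    omega

-- Stage 2 of Source B: scan the reversed path for the most recent below/above probes.
def binarySearch_closest_with_duplicate_alt (array : List Int) (x : Int) (low : Int) (high : Int) : Option Int × Option Int :=
  let rpath := (bsB_probe array x low high).reverse
  match rpath.head? with
  | none => (none, none)
  | some (m, v) =>
    if v = x then (some m, some m)
    else ((rpath.find? (fun p => decide (p.2 < x))).map Prod.fst,
          (rpath.find? (fun p => decide (x < p.2))).map Prod.fst)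

-- ===== PRECONDITION & SPEC =====
-- Pre_ excludes calls whose search window reaches outside [-len(array), len(array)): there A
-- may raise IndexError, and when Python's negative-index wraparound lets it return anyway, B
-- behaves identically, so nothing is lost.
def Pre_binarySearch_closest_with_duplicate (array : List Int) (x : Int) (low : Int) (high : Int) : Prop :=
  high < low ∨ (-(array.length : Int) ≤ low ∧ high < (array.length : Int))
instance (array : List Int) (x : Int) (low : Int) (high : Int) : Decidable (Pre_binarySearch_closest_with_duplicate array x low high) := by unfold Pre_binarySearch_closest_with_duplicate; infer_instance
def pvWitness_binarySearch_closest_with_duplicate : List Int × Int × Int × Int := ([1, 3, 3, 7], 4, 0, 3)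

def Spec_binarySearch_closest_with_duplicate (array : List Int) (x : Int) (low : Int) (high : Int) (out : Option Int × Option Int) : Prop := out = binarySearch_closest_with_duplicate_alt array x low high
instance (array : List Int) (x : Int) (low : Int) (high : Int) (out : Option Int × Option Int) : Decidable (Spec_binarySearch_closest_with_duplicate array x low high out) := by unfold Spec_binarySearch_closest_with_duplicate; infer_instance

-- ===== CLAIM =====
def Claim_equal_binarySearch_closest_with_duplicate : Prop := ∀ (array : List Int) (x : Int) (low : Int) (high : Int), Dom_binarySearch_closest_with_duplicate array x low high → Pre_binarySearch_closest_with_duplicate array x low high → Spec_binarySearch_closest_with_duplicate array x low high (binarySearch_closest_with_duplicate array x low high)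

-- ===== LEMMAS AND PROOFS =====
-- first-some combination: o defaulted by d
def pvComb (o d : Option Int) : Option Int :=
  match o with
  | none => d
  | some v => some v

-- A's loop body replayed over an already-recorded path (proof-only helper).
def pvFinish (x : Int) : List (Int × Int) → Option Int → Option Int → Option Int × Option Int
  | [], cb, ca => (cb, ca)
  | (m, v) :: rest, cb, ca =>
      if v = x then (some m, some m)
      else if v < x then pvFinish x rest (some m) ca
      else pvFinish x rest cb (some m)

theorem pvComb_none (o : Option Int) : pvComb o none = o := by cases o <;> rfl

-- A's loop equals replaying its decisions over B's probe path.
theorem bsA_loop_eq_finish (array : List Int) (x : Int) (low : Int) (high : Int)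
    (cb ca : Option Int) :
    bsA_loop array x low high cb ca = pvFinish x (bsB_probe array x low high) cb ca := by
  fun_induction bsA_loop array x low high cb ca
  case case5 => rw [bsB_probe, dif_neg (by omega)]; rfl
  all_goals
    rw [bsB_probe] <;> simp_all [pvFinish, not_lt] <;>
      (try rw [if_neg (by omega)]) <;> simp_all [pvFinish]

-- Shape of the probe path: either no recorded value equals x, or the path ends in the unique hit.
theorem bsB_probe_shape (array : List Int) (x : Int) (low : Int) (high : Int) :
    (∀ p ∈ bsB_probe array x low high, p.2 ≠ x) ∨
    (∃ front m, bsB_probe array x low high = front ++ [(m, x)] ∧ ∀ p ∈ front, p.2 ≠ x) := by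
  fun_induction bsB_probe array x low high
  case case1 => left; simp
  case case2 =>
    rename_i low high _ _
    right; exact ⟨[], pyMid low high, rfl, by simp⟩
  case case5 => left; simp
  all_goals
    rename_i low high _ v _ hne _ ih
    rcases ih with ih | ⟨front, m, heq, hfront⟩
    · left; intro p hp
      rcases List.mem_cons.mp hp with rfl | hp
      · simpa using hne
      · exact ih p hp
    · right
      refine ⟨(pyMid low high, v) :: front, m, by simp [heq], ?_⟩
      intro p hp
      rcases List.mem_cons.mp hp with rfl | hp
      · simpa using hne
      · exact hfront p hp

theorem pvFinish_no_hit (x : Int) (path : List (Int × Int)) (cb ca : Option Int)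
    (hne : ∀ p ∈ path, p.2 ≠ x) :
    pvFinish x path cb ca =
      (pvComb ((path.reverse.find? (fun p => decide (p.2 < x))).map Prod.fst) cb,
       pvComb ((path.reverse.find? (fun p => decide (x < p.2))).map Prod.fst) ca) := by
  induction path generalizing cb ca with
  | nil => simp [pvFinish, pvComb]
  | cons hd tl ih =>
    obtain ⟨m, v⟩ := hd
    have hvne : v ≠ x := hne (m, v) (List.mem_cons_self)
    have htl : ∀ p ∈ tl, p.2 ≠ x := fun p hp => hne p (List.mem_cons_of_mem _ hp)
    rw [pvFinish, if_neg hvne]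
    rcases lt_or_gt_of_ne hvne with hlt | hgt
    · rw [if_pos hlt, ih _ _ htl]
      simp only [List.reverse_cons, List.find?_append]
      congr 1
      · rcases hfind : tl.reverse.find? (fun p => decide (p.2 < x)) with _ | q
        · simp [hfind, hlt, pvComb]
        · simp [hfind, pvComb]
      · rcases hfind : tl.reverse.find? (fun p => decide (x < p.2)) with _ | q
        · simp [hfind, not_lt.mpr (le_of_lt hlt), pvComb]
        · simp [hfind, pvComb]
    · rw [if_neg (not_lt.mpr (le_of_lt hgt)), ih _ _ htl]
      simp only [List.reverse_cons, List.find?_append]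
      congr 1
      · rcases hfind : tl.reverse.find? (fun p => decide (p.2 < x)) with _ | q
        · simp [hfind, not_lt.mpr (le_of_lt hgt), pvComb]
        · simp [hfind, pvComb]
      · rcases hfind : tl.reverse.find? (fun p => decide (x < p.2)) with _ | q
        · simp [hfind, hgt, pvComb]
        · simp [hfind, pvComb]

theorem pvFinish_hit (x : Int) (front : List (Int × Int)) (m : Int) (cb ca : Option Int)
    (hne : ∀ p ∈ front, p.2 ≠ x) :
    pvFinish x (front ++ [(m, x)]) cb ca = (some m, some m) := by
  induction front generalizing cb ca with
  | nil => simp [pvFinish]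
  | cons hd tl ih =>
    obtain ⟨m', v⟩ := hd
    have hvne : v ≠ x := hne (m', v) (List.mem_cons_self)
    have htl : ∀ p ∈ tl, p.2 ≠ x := fun p hp => hne p (List.mem_cons_of_mem _ hp)
    rw [List.cons_append, pvFinish, if_neg hvne]
    split <;> exact ih _ _ htl

-- ===== VERDICT =====
theorem binarySearch_closest_with_duplicate_spec : Claim_equal_binarySearch_closest_with_duplicate := by
  intro array x low high _ _
  unfold Spec_binarySearch_closest_with_duplicate binarySearch_closest_with_duplicate
        binarySearch_closest_with_duplicate_alt
  rw [bsA_loop_eq_finish]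
  rcases bsB_probe_shape array x low high with hno | ⟨front, m, heq, hfront⟩
  · rw [pvFinish_no_hit x _ _ _ hno, pvComb_none, pvComb_none]
    rcases hr : (bsB_probe array x low high).reverse.head? with _ | q
    · have : (bsB_probe array x low high).reverse = [] := List.head?_eq_none_iff.mp hr
      simp [this]
    · obtain ⟨m, v⟩ := q
      have hmem : (m, v) ∈ (bsB_probe array x low high).reverse := List.mem_of_mem_head? hr
      have hvne : v ≠ x := hno (m, v) (List.mem_reverse.mp hmem)
      simp [hr, hvne]
  · rw [heq, pvFinish_hit x front m none none hfront]
    simp
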